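-- pv_equiv track=rewrite | github.com/Sassa-nf/pi | math_art/a.py | getPlusSignCount
-- ===== SOURCE A (Python) =====
-- from typing import List
--
-- def getPlusSignCount(N: int, L: List[int], D: str) -> int:
--    horz = {}
--    vert = {}
--    x, y = 0, 0
--    for o, d in zip(L, D):
--       if d == 'D':
--          vert.setdefault(x, []).append((y - o, y))
--          y -= o
--       elif d == 'U':
--          vert.setdefault(x, []).append((y, y + o))
--          y += o
--       elif d == 'L':
--          horz.setdefault(y, []).append((x - o, x))
--          x -= o
--       else:
--          horz.setdefault(y, []).append((x, x + o))
--          x += o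
--    return match(organize(horz), organize(vert))
--
-- def organize(horz):
--    res = []
--    for k, vs in horz.items():
--       vs.sort()
--       ls = [vs[0]]
--       for a, b in vs[1:]:
--          if b <= ls[-1][1]:
--             continue
--          if a <= ls[-1][1]:
--             a = ls.pop()[0]
--          ls.append((a, b))
--       res.append((k, ls))
--    res.sort()
--    return res
--
-- def bin_search(xs, x, key=None):
--    if key is None:
--       key = lambda x: x
--    lo, hi = 0, len(xs)
--    while lo < hi:
--       i = (lo + hi) // 2
--       if key(xs[i]) < x:
--          lo = i + 1
--       else:
--          hi = i
--
--    return lo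
--
-- def match(horz, vert):
--    ys = [v for x, vs in vert for y0, y1 in vs if y1 - y0 > 1 for v in [(y0 + 1, x), (y1, x)]]
--    ys.sort(key=lambda x: -x[0])
--
--    vs = [] # positions where vertical lines are for a row at y
--    cross = 0
--    for y, hs in horz:
--       xs = []
--       while ys and ys[-1][0] <= y:
--          xs.append(ys.pop()[1])
--       if xs:
--          xs.sort()
--
--          prev = xs[0]
--          c = 0
--          xs1 = []
--          for x in xs:
--             if x == prev:
--                c += 1
--                continue
--             if c & 1:
--                xs1.append(prev)
--             prev = x
--             c = 1
--
--          if c & 1: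
--             xs1.append(prev)
--
--          vs1 = []
--          j = 0
--          for x in xs1:
--             i = bin_search(vs, x)
--             vs1.extend(vs[j:i])
--             if i < len(vs) and vs[i] == x:
--                j = i+1
--             else:
--                vs1.append(x)
--                j = i
--          vs1.extend(vs[j:])
--          vs = vs1
--
--       for x0, x1 in hs:
--          if x1 - x0 == 1:
--             continue
--          i0, i1 = bin_search(vs, x0 + 1), bin_search(vs, x1)
--          cross += i1 - i0
--
--    return cross
-- ===== SOURCE B (Python) =====
-- def getPlusSignCount(N, L, D):
--     x, y = 0, 0
--     hsegs = []  # (y, x0, x1) in path order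
--     vsegs = []  # (x, y0, y1) in path order
--     for o, d in zip(L, D):
--         if d == 'D':
--             vsegs.append((x, y - o, y)); y -= o
--         elif d == 'U':
--             vsegs.append((x, y, y + o)); y += o
--         elif d == 'L':
--             hsegs.append((y, x - o, x)); x -= o
--         else:
--             hsegs.append((y, x, x + o)); x += o
--     horz = arrange(hsegs)
--     vert = arrange(vsegs)
--     events = [e for x_, vs in vert for y0, y1 in vs if y1 - y0 > 1
--               for e in ((y0 + 1, x_), (y1, x_))]
--     cross = 0
--     for y_, hs in horz:
--         # a vertical line at x_ is active at row y_ iff an odd number of its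
--         # toggle events lie at or below y_; recompute the parity table per row
--         par = {}
--         for e, x_ in events:
--             if e <= y_:
--                 par[x_] = not par.get(x_, False)
--         for x0, x1 in hs:
--             if x1 - x0 == 1:
--                 continue
--             # actives in the window [x0+1, x1) as a difference of prefix counts
--             for x_, p in par.items():
--                 if p:
--                     if x_ < x1:
--                         cross += 1
--                     if x_ < x0 + 1:
--                         cross -= 1
--     return cross
--
-- def arrange(segs):
--     # sorted keys, then per key the sorted intervals merged in one pass
--     keys = sorted(set(k for k, _, _ in segs))
--     res = []
--     for k in keys:
--         ivs = sorted((a, b) for k2, a, b in segs if k2 == k)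
--         merged = []
--         for a, b in ivs:
--             if merged and b <= merged[-1][1]:
--                 continue
--             if merged and a <= merged[-1][1]:
--                 merged[-1] = (merged[-1][0], b)
--             else:
--                 merged.append((a, b))
--         res.append((k, merged))
--     return res
-- ===== Notes on version B (the rewrite author's own statement) =====
-- stated objective: simpler
-- what changed: B drops A's incremental sweep state (a sorted active-column list maintained by event popping, run-length parity compression and binary-search symmetric-difference merges) and instead recomputes, for each horizontal row, a parity table of the vertical toggle events at or below that row in a dict, counting crossings by a prefix-count difference over that table; segments are grouped by sorting the collected (key, lo, hi) triples instead of via a dict of lists.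
import Mathlib
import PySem

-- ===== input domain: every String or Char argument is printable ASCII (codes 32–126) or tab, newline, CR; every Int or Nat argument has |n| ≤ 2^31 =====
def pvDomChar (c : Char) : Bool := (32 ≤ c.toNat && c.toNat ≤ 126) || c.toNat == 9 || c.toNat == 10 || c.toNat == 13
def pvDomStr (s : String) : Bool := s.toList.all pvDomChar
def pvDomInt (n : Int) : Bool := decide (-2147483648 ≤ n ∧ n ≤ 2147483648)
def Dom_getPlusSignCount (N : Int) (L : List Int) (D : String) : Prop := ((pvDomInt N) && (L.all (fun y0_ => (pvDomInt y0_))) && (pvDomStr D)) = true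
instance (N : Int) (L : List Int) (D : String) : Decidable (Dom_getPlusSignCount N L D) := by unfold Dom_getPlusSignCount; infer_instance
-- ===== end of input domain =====

-- B replaces A's incremental sorted-list sweep (pop events, run-length parity, binary
-- searches) by a per-row parity table recomputed from the event list: simpler, same values.

-- ===== PORT A =====
-- bin_search with the default identity key (the only way A calls it): the while loop
-- as recursion on hi - lo
def pvBinLoop (xs : List Int) (x lo hi : Int) : Int :=
  if _h : lo < hi then
    let i := PySem.Int.floordiv (lo + hi) 2
    -- index i is always in range at every call site, so pyGetD with a dummy default is exact
    if PySem.List.pyGetD xs i 0 < x then pvBinLoop xs x (i + 1) hi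
    else pvBinLoop xs x lo i
  else lo
termination_by (hi - lo).toNat
decreasing_by
  · have := PySem.Int.le_floordiv_iff_mul_le (a := lo + hi) (b := 2) (q := lo) (by omega)
    omega
  · have := PySem.Int.floordiv_lt_iff_lt_mul (a := lo + hi) (b := 2) (q := hi) (by omega)
    omega

def pvBinSearch (xs : List Int) (x : Int) : Int :=
  pvBinLoop xs x 0 (PySem.List.len xs)

-- body of the merging loop in organize (ls[-1] / ls.pop() on an always-nonempty ls)
def pvMergeStepA (ls : List (Int × Int)) (p : Int × Int) : List (Int × Int) :=
  let last := ls.getLast?.getD (0, 0)   -- ls is never empty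
  if p.2 ≤ last.2 then ls
  else if p.1 ≤ last.2 then ls.dropLast ++ [(last.1, p.2)]
  else ls ++ [p]

def pvMergeA (vs : List (Int × Int)) : List (Int × Int) :=
  match PySem.List.sorted2 vs Prod.fst Prod.snd with
  | [] => []   -- unreachable: every dict value in A is a nonempty list
  | v0 :: rest => rest.foldl pvMergeStepA [v0]

def pvOrganize (d : PySem.Dict Int (List (Int × Int))) : List (Int × List (Int × Int)) :=
  -- res.sort() compares (k, ls) tuples; the keys are dict keys, hence distinct,
  -- so sorting by the key alone is Python's tuple sort here
  PySem.List.sorted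
    (d.items.foldl (fun res kv => res ++ [(kv.1, pvMergeA kv.2)]) [])
    Prod.fst

-- while ys and ys[-1][0] <= y: xs.append(ys.pop()[1])
def pvPopLoop (y : Int) (ys : List (Int × Int)) (xs : List Int) :
    List (Int × Int) × List Int :=
  match h : ys.getLast? with
  | some p =>
    if p.1 ≤ y then pvPopLoop y ys.dropLast (xs ++ [p.2]) else (ys, xs)
  | none => (ys, xs)
termination_by ys.length
decreasing_by
  have : ys ≠ [] := by intro hnil; subst hnil; simp at h
  cases ys with
  | nil => exact absurd rfl this
  | cons a t => simp

-- xs.sort(); the run-length parity pass producing xs1 (called only with xs ≠ [])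
def pvOddStep (st : Int × Int × List Int) (v : Int) : Int × Int × List Int :=
  if v == st.1 then (st.1, st.2.1 + 1, st.2.2)
  else (v, 1, if PySem.Int.band st.2.1 1 != 0 then st.2.2 ++ [st.1] else st.2.2)

def pvOddA (xs : List Int) : List Int :=
  let s := PySem.List.sorted xs (fun v => v)
  let st := s.foldl pvOddStep (s.head?.getD 0, 0, [])   -- prev = xs[0]; xs nonempty here
  if PySem.Int.band st.2.1 1 != 0 then st.2.2 ++ [st.1] else st.2.2

-- the vs1/j merge of vs with xs1
def pvSymStep (vs : List Int) (st : List Int × Int) (x : Int) : List Int × Int :=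
  let i := pvBinSearch vs x
  let vs1 := st.1 ++ PySem.List.slice vs (some st.2) (some i)
  -- 'i < len(vs) and vs[i] == x'; i is nonnegative here, so this is pyGet?
  if PySem.List.pyGet? vs i == some x then (vs1, i + 1)
  else (vs1 ++ [x], i)

def pvSymA (vs : List Int) (xs1 : List Int) : List Int :=
  let st := xs1.foldl (pvSymStep vs) ([], 0)
  st.1 ++ PySem.List.slice vs (some st.2) none

-- one iteration of the main loop of match: state (ys, vs, cross), row (y, hs)
def pvMatchStepA (st : List (Int × Int) × List Int × Int) (yhs : Int × List (Int × Int)) :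
    List (Int × Int) × List Int × Int :=
  let pr := pvPopLoop yhs.1 st.1 []
  let vs := if pr.2 ≠ [] then pvSymA st.2.1 (pvOddA pr.2) else st.2.1
  let cross := yhs.2.foldl (fun c p =>
      if p.2 - p.1 == 1 then c
      else c + (pvBinSearch vs p.2 - pvBinSearch vs (p.1 + 1))) st.2.2
  (pr.1, vs, cross)

def pvMatchA (horz vert : List (Int × List (Int × Int))) : Int :=
  let ys0 := vert.flatMap (fun xv =>
    (xv.2.filter (fun p => decide (p.2 - p.1 > 1))).flatMap
      (fun p => [(p.1 + 1, xv.1), (p.2, xv.1)]))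
  let ys1 := PySem.List.sorted ys0 (fun p => -p.1)
  (horz.foldl pvMatchStepA (ys1, [], 0)).2.2

-- the walk: vert.setdefault(x, []).append(seg) is d[x] = d.get(x, []) + [seg], i.e. modify
def pvStepA
    (st : PySem.Dict Int (List (Int × Int)) × PySem.Dict Int (List (Int × Int)) × Int × Int)
    (od : Int × Char) :
    PySem.Dict Int (List (Int × Int)) × PySem.Dict Int (List (Int × Int)) × Int × Int :=
  let horz := st.1; let vert := st.2.1; let x := st.2.2.1; let y := st.2.2.2
  let o := od.1; let d := od.2
  if d == 'D' then (horz, vert.modify x [] (· ++ [(y - o, y)]), x, y - o)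
  else if d == 'U' then (horz, vert.modify x [] (· ++ [(y, y + o)]), x, y + o)
  else if d == 'L' then (horz.modify y [] (· ++ [(x - o, x)]), vert, x - o, y)
  else (horz.modify y [] (· ++ [(x, x + o)]), vert, x + o, y)

def getPlusSignCount (N : Int) (L : List Int) (D : String) : Int :=
  let st := (L.zip D.toList).foldl pvStepA (PySem.Dict.empty, PySem.Dict.empty, 0, 0)
  pvMatchA (pvOrganize st.1) (pvOrganize st.2.1)

-- ===== PORT B =====
-- B: sorted keys, per key the sorted intervals merged in one pass
def pvMergeStepB (merged : List (Int × Int)) (p : Int × Int) : List (Int × Int) :=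
  match merged.getLast? with
  | none => merged ++ [p]
  | some last =>
    if p.2 ≤ last.2 then merged
    else if p.1 ≤ last.2 then merged.dropLast ++ [(last.1, p.2)]
    else merged ++ [p]

def pvArrangeB (segs : List (Int × Int × Int)) : List (Int × List (Int × Int)) :=
  let keys := PySem.List.sorted (PySem.Set.ofList (segs.map (·.1))) (fun k => k)
  keys.foldl (fun res k =>
    let ivs := PySem.List.sorted2 ((segs.filter (fun s => s.1 == k)).map (·.2))
        Prod.fst Prod.snd
    res ++ [(k, ivs.foldl pvMergeStepB [])]) []

-- parity table of the toggle events at or below row y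
def pvRowParB (events : List (Int × Int)) (y : Int) : PySem.Dict Int Bool :=
  events.foldl (fun par ev =>
      if ev.1 ≤ y then par.insert ev.2 (!(par.getD ev.2 false)) else par)
    PySem.Dict.empty

-- one row of B's main loop
def pvRowB (events : List (Int × Int)) (cross : Int) (yhs : Int × List (Int × Int)) : Int :=
  let par := pvRowParB events yhs.1
  yhs.2.foldl (fun cross p =>
      if p.2 - p.1 == 1 then cross
      else par.items.foldl (fun (cross : Int) xb =>
          if xb.2 then
            let c1 := if xb.1 < p.2 then cross + 1 else cross
            if xb.1 < p.1 + 1 then c1 - 1 else c1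
          else cross) cross) cross

def pvStepB (st : List (Int × Int × Int) × List (Int × Int × Int) × Int × Int)
    (od : Int × Char) : List (Int × Int × Int) × List (Int × Int × Int) × Int × Int :=
  let hs := st.1; let vs := st.2.1; let x := st.2.2.1; let y := st.2.2.2
  let o := od.1; let d := od.2
  if d == 'D' then (hs, vs ++ [(x, y - o, y)], x, y - o)
  else if d == 'U' then (hs, vs ++ [(x, y, y + o)], x, y + o)
  else if d == 'L' then (hs ++ [(y, x - o, x)], vs, x - o, y)
  else (hs ++ [(y, x, x + o)], vs, x + o, y)

def getPlusSignCount_alt (N : Int) (L : List Int) (D : String) : Int :=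
  let st := (L.zip D.toList).foldl pvStepB ([], [], 0, 0)
  let horz := pvArrangeB st.1
  let vert := pvArrangeB st.2.1
  let events := vert.flatMap (fun xv =>
    (xv.2.filter (fun p => decide (p.2 - p.1 > 1))).flatMap
      (fun p => [(p.1 + 1, xv.1), (p.2, xv.1)]))
  horz.foldl (pvRowB events) 0

-- ===== PRECONDITION & SPEC =====
def Spec_getPlusSignCount (N : Int) (L : List Int) (D : String) (out : Int) : Prop := out = getPlusSignCount_alt N L D
instance (N : Int) (L : List Int) (D : String) (out : Int) : Decidable (Spec_getPlusSignCount N L D out) := by unfold Spec_getPlusSignCount; infer_instance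

-- ===== CLAIM (what is proved, stated in full; the proofs are below) =====
def Claim_equal_getPlusSignCount : Prop := ∀ (N : Int) (L : List Int) (D : String), Dom_getPlusSignCount N L D → Spec_getPlusSignCount N L D (getPlusSignCount N L D)

-- ===== LEMMAS AND PROOFS =====

-- the dict A builds from the triples B collects
def segDict (segs : List (Int × Int × Int)) : PySem.Dict Int (List (Int × Int)) :=
  segs.foldl (fun d p => d.modify p.1 [] (· ++ [p.2])) PySem.Dict.empty

theorem segDict_snoc (hs : List (Int × Int × Int)) (p : Int × Int × Int) :
    segDict (hs ++ [p]) = (segDict hs).modify p.1 [] (· ++ [p.2]) := by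
  simp [segDict, List.foldl_append]

theorem build_rel (ps : List (Int × Char)) :
    ∀ (hs vs : List (Int × Int × Int)) (x y : Int),
    ps.foldl pvStepA (segDict hs, segDict vs, x, y) =
      ((fun t => (segDict t.1, segDict t.2.1, t.2.2)) (ps.foldl pvStepB (hs, vs, x, y))) := by
  induction ps with
  | nil => intro hs vs x y; rfl
  | cons od t ih =>
    intro hs vs x y
    simp only [List.foldl_cons]
    have step : pvStepA (segDict hs, segDict vs, x, y) od =
        ((fun t => (segDict t.1, segDict t.2.1, t.2.2)) (pvStepB (hs, vs, x, y) od)) := by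
      simp only [pvStepA, pvStepB]
      by_cases h1 : od.2 == 'D' <;> by_cases h2 : od.2 == 'U' <;> by_cases h3 : od.2 == 'L' <;>
        simp [h1, h2, h3, segDict_snoc]
    rw [step]
    rcases h : pvStepB (hs, vs, x, y) od with ⟨a, b, c, d⟩
    exact ih a b c d

-- parity of the number of events at column x at or below row t
def actB (E : List (Int × Int)) (t x : Int) : Bool :=
  (E.countP (fun ev => ev.2 == x && ev.1 ≤ t)) % 2 == 1

theorem countP_of_split (vs : List Int) (x : Int) (n : Nat) (hn : n ≤ vs.length)
    (h1 : ∀ (j : Nat) (hj : j < vs.length), j < n → vs[j] < x)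
    (h2 : ∀ (j : Nat) (hj : j < vs.length), n ≤ j → x ≤ vs[j]) :
    vs.countP (fun v => decide (v < x)) = n := by
  conv_lhs => rw [← List.take_append_drop n vs]
  rw [List.countP_append]
  have ht : (vs.take n).countP (fun v => decide (v < x)) = (vs.take n).length := by
    apply List.countP_eq_length.mpr
    intro a ha
    obtain ⟨j, hj, rfl⟩ := List.mem_iff_getElem.mp ha
    have hjn : j < n := by simp [List.length_take] at hj; omega
    have hjl : j < vs.length := by simp [List.length_take] at hj; omega
    rw [List.getElem_take]
    exact decide_eq_true (h1 j hjl hjn)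
  have hd : (vs.drop n).countP (fun v => decide (v < x)) = 0 := by
    apply List.countP_eq_zero.mpr
    intro a ha
    obtain ⟨j, hj, rfl⟩ := List.mem_iff_getElem.mp ha
    have hjl : n + j < vs.length := by have := hj; simp [List.length_drop] at this; omega
    rw [List.getElem_drop]
    simpa using not_lt.mpr (h2 (n+j) hjl (by omega))
  rw [ht, hd, List.length_take]
  omega

theorem binLoop_inv (vs : List Int) (x : Int) (hsort : vs.Pairwise (· ≤ ·)) :
    ∀ lo hi : Int, 0 ≤ lo → lo ≤ hi → hi ≤ (vs.length : Int) →
    (∀ (j : Nat) (hj : j < vs.length), (j : Int) < lo → vs[j] < x) →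
    (∀ (j : Nat) (hj : j < vs.length), hi ≤ (j : Int) → x ≤ vs[j]) →
    pvBinLoop vs x lo hi = ((vs.countP (fun v => decide (v < x)) : Nat) : Int) := by
  intro lo hi
  induction lo, hi using pvBinLoop.induct vs x with
  | case1 lo hi hlt i hcond ih =>
    intro h0 hlh hhi h1 h2
    have hloi : lo ≤ i := by
      have := PySem.Int.le_floordiv_iff_mul_le (a := lo + hi) (b := 2) (q := lo) (by omega)
      simp only [i] at *; omega
    have hihi : i < hi := by
      have := PySem.Int.floordiv_lt_iff_lt_mul (a := lo + hi) (b := 2) (q := hi) (by omega)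
      simp only [i] at *; omega
    have hiv : vs[i.toNat] < x := by
      rwa [PySem.List.pyGetD_eq_getElem (xs := vs) (i := i) (d := 0) (by omega) (by omega)] at hcond
    rw [pvBinLoop]
    have hcond' : PySem.List.pyGetD vs (PySem.Int.floordiv (lo + hi) 2) 0 < x := hcond
    simp only [hlt, dif_pos]
    rw [if_pos hcond']
    apply ih (by omega) (by omega) hhi
    · intro j hj hji
      rcases lt_or_eq_of_le (show j ≤ i.toNat by omega) with h | h
      · calc vs[j] ≤ vs[i.toNat] := (List.pairwise_iff_getElem.mp hsort) j i.toNat hj (by omega) h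
          _ < x := hiv
      · subst h; exact hiv
    · exact h2
  | case2 lo hi hlt i hcond ih =>
    intro h0 hlh hhi h1 h2
    have hloi : lo ≤ i := by
      have := PySem.Int.le_floordiv_iff_mul_le (a := lo + hi) (b := 2) (q := lo) (by omega)
      simp only [i] at *; omega
    have hihi : i < hi := by
      have := PySem.Int.floordiv_lt_iff_lt_mul (a := lo + hi) (b := 2) (q := hi) (by omega)
      simp only [i] at *; omega
    have hiv : x ≤ vs[i.toNat] := by
      rw [PySem.List.pyGetD_eq_getElem (xs := vs) (i := i) (d := 0) (by omega) (by omega)] at hcond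
      omega
    rw [pvBinLoop]
    have hcond' : ¬ PySem.List.pyGetD vs (PySem.Int.floordiv (lo + hi) 2) 0 < x := hcond
    simp only [hlt, dif_pos]
    rw [if_neg hcond']
    apply ih h0 (by omega) (by omega) h1
    intro j hj hji
    rcases lt_or_eq_of_le (show i.toNat ≤ j by omega) with h | h
    · calc x ≤ vs[i.toNat] := hiv
        _ ≤ vs[j] := (List.pairwise_iff_getElem.mp hsort) i.toNat j (by omega) hj h
    · subst h; exact hiv
  | case3 lo hi hlt =>
    intro h0 hlh hhi h1 h2
    rw [pvBinLoop, dif_neg hlt]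
    have heq : lo = hi := by omega
    subst heq
    rw [countP_of_split vs x lo.toNat (by omega)
      (fun j hj hjn => h1 j hj (by omega)) (fun j hj hjn => h2 j hj (by omega))]
    omega

theorem binSearch_eq (vs : List Int) (x : Int) (h : vs.Pairwise (· ≤ ·)) :
    pvBinSearch vs x = ((vs.countP (fun v => decide (v < x)) : Nat) : Int) := by
  unfold pvBinSearch
  rw [PySem.List.len_eq]
  exact binLoop_inv vs x h 0 vs.length (by omega) (by omega) (by omega)
    (fun j hj hji => absurd hji (by omega)) (fun j hj hji => absurd hji (by push_cast; omega))

theorem merge_eq (ivs : List (Int × Int)) :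
    ivs.foldl pvMergeStepB [] =
      (match ivs with
       | [] => []
       | v0 :: rest => rest.foldl pvMergeStepA [v0]) := by
  cases ivs with
  | nil => rfl
  | cons v0 rest =>
    simp only [List.foldl_cons]
    have h0 : pvMergeStepB [] v0 = [v0] := rfl
    rw [h0]
    have key : ∀ (l : List (Int × Int)) (acc : List (Int × Int)), acc ≠ [] →
        l.foldl pvMergeStepB acc = l.foldl pvMergeStepA acc := by
      intro l
      induction l with
      | nil => intro acc _; rfl
      | cons p t ih =>
        intro acc hacc
        simp only [List.foldl_cons]
        obtain ⟨last, hlast⟩ : ∃ last, acc.getLast? = some last := by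
          cases acc with
          | nil => exact absurd rfl hacc
          | cons a t' => exact ⟨_, List.getLast?_eq_some_getLast (l := a :: t') (by simp)⟩
        have hstep : pvMergeStepB acc p = pvMergeStepA acc p := by
          simp only [pvMergeStepA, pvMergeStepB, hlast, Option.getD_some]
        rw [hstep]
        apply ih
        -- every branch of pvMergeStepA keeps the accumulator nonempty
        simp only [pvMergeStepA, hlast, Option.getD_some]
        split
        · exact hacc
        · split <;> simp
      -- (getLast? of a nonempty list is some)
    exact key rest [v0] (by simp)

theorem arrangeB_shape (segs : List (Int × Int × Int)) :
    pvArrangeB segs =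
      (PySem.List.sorted (PySem.Set.ofList (segs.map (·.1))) (fun k => k)).map
        (fun k => (k, (PySem.List.sorted2 ((segs.filter (fun s => s.1 == k)).map (·.2))
          Prod.fst Prod.snd).foldl pvMergeStepB [])) := by
  unfold pvArrangeB
  rw [PySem.List.foldl_append_singleton_eq_map]
  simp

theorem organize_eq (segs : List (Int × Int × Int)) :
    pvOrganize (segDict segs) = pvArrangeB segs := by
  have hkeys : (segDict segs).keys = PySem.Set.ofList (segs.map (·.1)) := by
    have := PySem.Dict.keys_foldl_modify_key (l := segs) (key := fun p => p.1)
      (d0 := ([] : List (Int × Int))) (f := fun _ p => (· ++ [p.2])) (d := PySem.Dict.empty)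
    simpa [segDict, PySem.Set.update_nil_left] using this
  have hnd : (segDict segs).keys.Nodup := by
    rw [hkeys]; exact PySem.Set.nodup_ofList _
  have hgetD : ∀ k, (segDict segs).getD k [] =
      (segs.filter (fun s => s.1 == k)).map (·.2) := by
    intro k
    have := PySem.Dict.getD_foldl_modify_append (l := segs) (d := PySem.Dict.empty) (c := k)
    simpa [segDict] using this
  have hitems : (segDict segs).items =
      ((segDict segs).keys).map (fun k => (k, (segDict segs).getD k [])) :=
    PySem.Dict.items_eq_map_keys _ hnd []
  unfold pvOrganize
  rw [PySem.List.foldl_append_singleton_eq_map, hitems, hkeys]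
  rw [arrangeB_shape]
  apply PySem.List.sorted_eq_of_perm_of_pairwise_lt
  · -- the two maps are permutations of each other
    refine List.Perm.trans (List.Perm.map _ (PySem.List.sorted_perm _ _ _)) ?_
    rw [List.nil_append, List.map_map]
    apply List.Perm.of_eq
    apply List.map_congr_left
    intro k _
    simp only [Function.comp]
    rw [hgetD k]
    congr 1
    rw [merge_eq]
    rfl
  · -- strictly increasing keys
    apply List.Pairwise.map
    · intro a b h
      exact h
    · exact PySem.List.sorted_ofList_pairwise_lt _



theorem popLoop_eq (y : Int) (ys : List (Int × Int)) (xs : List Int) :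
    pvPopLoop y ys xs =
      ((ys.reverse.dropWhile (fun p => decide (p.1 ≤ y))).reverse,
       xs ++ (ys.reverse.takeWhile (fun p => decide (p.1 ≤ y))).map (·.2)) := by
  induction ys using List.reverseRecOn generalizing xs with
  | nil => rw [pvPopLoop]; simp
  | append_singleton ys p ih =>
    rw [pvPopLoop]
    split
    next p1 h =>
      rw [List.getLast?_concat] at h
      cases h
      simp only [List.dropLast_concat, List.reverse_append, List.reverse_cons,
        List.reverse_nil, List.nil_append, List.cons_append]
      by_cases hp : p.1 ≤ y
      · simp only [hp, if_pos, List.takeWhile_cons, List.dropWhile_cons, decide_true]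
        rw [ih]
        simp
      · simp only [hp, if_neg, List.takeWhile_cons, List.dropWhile_cons, decide_false]
        simp [hp]
    next h =>
      rw [List.getLast?_concat] at h
      exact absurd h (by simp)

theorem tw_filter {α : Type} (p : α → Bool) (R : α → α → Prop)
    (hmono : ∀ a b, R a b → p b = true → p a = true) :
    ∀ l : List α, l.Pairwise R →
      l.takeWhile p = l.filter p ∧ l.dropWhile p = l.filter (fun z => !(p z)) := by
  intro l
  induction l with
  | nil => intro _; exact ⟨rfl, rfl⟩
  | cons a t ih =>
    intro hp
    rw [List.pairwise_cons] at hp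
    obtain ⟨ha, ht⟩ := hp
    rcases ih ht with ⟨ih1, ih2⟩
    by_cases hpa : p a = true
    · simp [List.takeWhile_cons, List.dropWhile_cons, hpa, ih1, ih2]
    · have hall : ∀ b ∈ t, p b = false := by
        intro b hb
        cases hpb : p b
        · rfl
        · exact absurd (hmono a b (ha b hb) hpb) hpa
      constructor
      · simp only [List.takeWhile_cons, hpa]
        rw [List.filter_cons_of_neg (by simp [hpa])]
        rw [List.filter_eq_nil_iff.mpr (by intro b hb; simp [hall b hb])]
        simp [hpa]
      · simp only [List.dropWhile_cons, hpa]
        rw [List.filter_cons_of_pos (by simp [hpa])]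
        rw [List.filter_eq_self.mpr (by intro b hb; simp [hall b hb])]
        simp [hpa]

theorem countP_and_split {α : Type} (l : List α) (p q : α → Bool) :
    l.countP p = l.countP (fun z => p z && q z) + l.countP (fun z => p z && !(q z)) := by
  induction l with
  | nil => rfl
  | cons a t ih =>
    simp only [List.countP_cons]
    cases hpa : p a <;> cases hqa : q a <;> simp [hpa, hqa] <;> omega

theorem toggle_getD (x : Int) :
    ∀ (l : List (Int × Int)) (d : PySem.Dict Int Bool),
    (l.foldl (fun par ev => par.insert ev.2 (!(par.getD ev.2 false))) d).getD x false =
      ((d.getD x false).xor (l.countP (fun ev => ev.2 == x) % 2 == 1)) := by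
  intro l
  induction l with
  | nil => intro d; simp
  | cons ev t ih =>
    intro d
    obtain ⟨e1, e2⟩ := ev
    simp only [List.foldl_cons, List.countP_cons]
    rw [ih]
    by_cases hx : e2 = x
    · subst hx
      rw [PySem.Dict.getD_insert]
      simp only [if_pos rfl, beq_self_eq_true, if_true]
      cases hdx : d.getD e2 false <;>
        rcases Nat.even_or_odd (t.countP (fun ev => ev.2 == e2)) with hpar | hpar <;>
          simp [Nat.even_iff, Nat.odd_iff] at hpar <;>
            simp [hpar, Nat.add_mod]
    · rw [PySem.Dict.getD_insert]
      simp [hx, Ne.symm hx, beq_iff_eq]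
theorem bandP (c : Int) : (PySem.Int.band c 1 != 0) = decide (c % 2 = 1) := by
  rw [PySem.Int.band_one, PySem.Int.mod_eq_emod_of_pos (by omega)]
  rcases Int.emod_two_eq c with h | h <;> simp [h]

theorem oddRun :
    ∀ (rest : List Int) (prev c : Int) (acc : List Int),
    rest.Pairwise (· ≤ ·) → (∀ z ∈ rest, prev ≤ z) →
    acc.Pairwise (· < ·) → (∀ a ∈ acc, a < prev) →
    ((let st := rest.foldl pvOddStep (prev, c, acc)
      if PySem.Int.band st.2.1 1 != 0 then st.2.2 ++ [st.1] else st.2.2).Pairwise (· < ·) ∧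
     ∀ x, (x ∈ (let st := rest.foldl pvOddStep (prev, c, acc)
        if PySem.Int.band st.2.1 1 != 0 then st.2.2 ++ [st.1] else st.2.2) ↔
       (x ∈ acc ∨ (x = prev ∧ (c + (rest.count prev : Int)) % 2 = 1) ∨
        (x ∈ rest ∧ x ≠ prev ∧ ((rest.count x : Int)) % 2 = 1)))) := by
  intro rest
  induction rest with
  | nil =>
    intro prev c acc _ _ hacc haccp
    simp only [List.foldl_nil, bandP]
    by_cases hc : c % 2 = 1
    · constructor
      · simp only [hc, decide_true, if_pos]
        rw [List.pairwise_append]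
        exact ⟨hacc, List.pairwise_singleton _ _, by intro a ha b hb; simp at hb; subst hb; exact haccp a ha⟩
      · intro x
        simp [hc]
    · constructor
      · simp only [hc, decide_false, if_neg, Bool.false_eq_true, not_false_iff]
        simpa using hacc
      · intro x
        simp [hc]
  | cons v t ih =>
    intro prev c acc hpw hall hacc haccp
    rw [List.pairwise_cons] at hpw
    obtain ⟨hvle, htpw⟩ := hpw
    simp only [List.foldl_cons]
    by_cases hv : v = prev
    · subst hv
      have hstep : pvOddStep (v, c, acc) v = (v, c + 1, acc) := by
        simp [pvOddStep]
      rw [hstep]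
      obtain ⟨hpw', hmem'⟩ := ih v (c + 1) acc htpw hvle hacc haccp
      refine ⟨hpw', fun x => ?_⟩
      rw [hmem' x]
      have hcnt : (c + 1) + (t.count v : Int) = c + (((v :: t).count v : Int)) := by
        rw [List.count_cons_self]; push_cast; ring
      constructor
      · rintro (h | ⟨rfl, hpar⟩ | ⟨h1, h2, h3⟩)
        · exact Or.inl h
        · exact Or.inr (Or.inl ⟨rfl, by omega⟩)
        · refine Or.inr (Or.inr ⟨List.mem_cons_of_mem _ h1, h2, ?_⟩)
          rwa [List.count_cons_of_ne (Ne.symm h2)]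
      · rintro (h | ⟨rfl, hpar⟩ | ⟨h1, h2, h3⟩)
        · exact Or.inl h
        · exact Or.inr (Or.inl ⟨rfl, by omega⟩)
        · rcases List.mem_cons.mp h1 with rfl | h1'
          · exact absurd rfl h2
          · refine Or.inr (Or.inr ⟨h1', h2, ?_⟩)
            rwa [List.count_cons_of_ne (Ne.symm h2)] at h3
    · have hplt : prev < v := lt_of_le_of_ne (hall v (by simp)) (fun h => hv h.symm)
      have hstep : pvOddStep (prev, c, acc) v =
          (v, 1, if PySem.Int.band c 1 != 0 then acc ++ [prev] else acc) := by
        simp [pvOddStep, hv]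
      rw [hstep]
      set acc' := if PySem.Int.band c 1 != 0 then acc ++ [prev] else acc with hacc'def
      have hacc'pw : acc'.Pairwise (· < ·) := by
        rw [hacc'def, bandP]
        by_cases hc : c % 2 = 1
        · simp only [hc, decide_true, if_pos]
          rw [List.pairwise_append]
          exact ⟨hacc, List.pairwise_singleton _ _,
            by intro a ha b hb; simp at hb; subst hb; exact haccp a ha⟩
        · simpa [hc] using hacc
      have hacc'lt : ∀ a ∈ acc', a < v := by
        intro a ha
        rw [hacc'def, bandP] at ha
        by_cases hc : c % 2 = 1
        · simp [hc] at ha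
          rcases ha with ha | rfl
          · exact lt_trans (haccp a ha) hplt
          · exact hplt
        · simp [hc] at ha
          exact lt_trans (haccp a ha) hplt
      have hacc'mem : ∀ x, (x ∈ acc' ↔ (x ∈ acc ∨ (x = prev ∧ c % 2 = 1))) := by
        intro x
        rw [hacc'def, bandP]
        by_cases hc : c % 2 = 1 <;> simp [hc]
      have htgt : ∀ z ∈ t, v ≤ z := hvle
      obtain ⟨hpw', hmem'⟩ := ih v 1 acc' htpw htgt hacc'pw hacc'lt
      have hprevnot : prev ∉ v :: t := by
        intro h
        rcases List.mem_cons.mp h with h' | h'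
        · exact absurd h'.symm hv
        · exact absurd (hvle prev h') (by omega)
      have hcnt0 : (v :: t).count prev = 0 := List.count_eq_zero.mpr hprevnot
      refine ⟨hpw', fun x => ?_⟩
      rw [hmem' x, hacc'mem x]
      constructor
      · rintro ((h | ⟨rfl, hpar⟩) | ⟨rfl, hpar⟩ | ⟨h1, h2, h3⟩)
        · exact Or.inl h
        · exact Or.inr (Or.inl ⟨rfl, by rw [hcnt0]; push_cast; omega⟩)
        · refine Or.inr (Or.inr ⟨by simp, fun h => hv h, ?_⟩)
          rw [List.count_cons_self]; push_cast at hpar ⊢; omega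
        · have hxv : v < x := lt_of_le_of_ne (htgt x h1) (fun h => h2 h.symm)
          refine Or.inr (Or.inr ⟨List.mem_cons_of_mem _ h1, by omega, ?_⟩)
          rwa [List.count_cons_of_ne (Ne.symm h2)]
      · rintro (h | ⟨rfl, hpar⟩ | ⟨h1, h2, h3⟩)
        · exact Or.inl (Or.inl h)
        · rw [hcnt0] at hpar
          exact Or.inl (Or.inr ⟨rfl, by push_cast at hpar; omega⟩)
        · rcases List.mem_cons.mp h1 with rfl | h1'
          · refine Or.inr (Or.inl ⟨rfl, ?_⟩)
            rw [List.count_cons_self] at h3; push_cast at h3 ⊢; omega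
          · by_cases hxv2 : x = v
            · subst hxv2
              refine Or.inr (Or.inl ⟨rfl, ?_⟩)
              rw [List.count_cons_self] at h3; push_cast at h3 ⊢; omega
            · refine Or.inr (Or.inr ⟨h1', hxv2, ?_⟩)
              rwa [List.count_cons_of_ne (Ne.symm hxv2)] at h3

theorem oddA_spec (xs : List Int) (hne : xs ≠ []) :
    (pvOddA xs).Pairwise (· < ·) ∧ ∀ x, (x ∈ pvOddA xs ↔ xs.count x % 2 = 1) := by
  have hperm : (PySem.List.sorted xs (fun v => v)).Perm xs := PySem.List.sorted_perm xs _ _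
  have hspw : (PySem.List.sorted xs (fun v => v)).Pairwise (· ≤ ·) := by
    have := PySem.List.sorted_pairwise (xs := xs) (key := fun v => v)
    simpa using this
  have hsne : PySem.List.sorted xs (fun v => v) ≠ [] := by
    intro h; rw [PySem.List.sorted_eq_nil_iff] at h; exact hne h
  obtain ⟨v0, t, hst⟩ := List.exists_cons_of_ne_nil hsne
  have hall : ∀ z ∈ PySem.List.sorted xs (fun v => v), v0 ≤ z := by
    rw [hst]
    rw [hst, List.pairwise_cons] at hspw
    intro z hz
    rcases List.mem_cons.mp hz with rfl | hz'
    · exact le_refl z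
    · exact hspw.1 z hz'
  have hhead : (PySem.List.sorted xs (fun v => v)).head?.getD 0 = v0 := by rw [hst]; rfl
  obtain ⟨hpw, hmem⟩ := oddRun (PySem.List.sorted xs (fun v => v)) v0 0 []
    hspw hall List.Pairwise.nil (by simp)
  unfold pvOddA
  simp only [hhead]
  refine ⟨hpw, fun x => ?_⟩
  rw [hmem x]
  have hcx : (PySem.List.sorted xs (fun v => v)).count x = xs.count x := hperm.count_eq x
  have hcv : (PySem.List.sorted xs (fun v => v)).count v0 = xs.count v0 := hperm.count_eq v0
  constructor
  · rintro (h | ⟨rfl, hpar⟩ | ⟨h1, h2, h3⟩)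
    · exact absurd h (List.not_mem_nil)
    · rw [hcv] at hpar; push_cast at hpar; omega
    · rw [hcx] at h3; push_cast at h3; omega
  · intro hodd
    by_cases hxv : x = v0
    · subst hxv
      refine Or.inr (Or.inl ⟨rfl, ?_⟩)
      rw [hcv]; push_cast; omega
    · refine Or.inr (Or.inr ⟨?_, hxv, by rw [hcx]; push_cast; omega⟩)
      have : 0 < (PySem.List.sorted xs (fun v => v)).count x := by rw [hcx]; omega
      exact List.count_pos_iff.mp this

theorem symRun (vs : List Int) (hv : vs.Pairwise (· < ·)) :
    ∀ (xs1 : List Int) (j : Int) (acc : List Int),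
    xs1.Pairwise (· < ·) → 0 ≤ j → (j : Int) ≤ vs.length →
    (∀ v ∈ vs.take j.toNat, ∀ x ∈ xs1, v < x) →
    ∃ Z, ((xs1.foldl (pvSymStep vs) (acc, j)).1 ++
            PySem.List.slice vs (some (xs1.foldl (pvSymStep vs) (acc, j)).2) none = acc ++ Z) ∧
      Z.Pairwise (· < ·) ∧
      (∀ z, z ∈ Z ↔ ((z ∈ vs.drop j.toNat ∧ z ∉ xs1) ∨ (z ∉ vs.drop j.toNat ∧ z ∈ xs1))) := by
  intro xs1
  induction xs1 with
  | nil =>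
    intro j acc _ h0 hj _
    refine ⟨vs.drop j.toNat, ?_, ?_, ?_⟩
    · simp [PySem.List.slice_from vs h0]
    · exact hv.sublist (List.drop_sublist _ _)
    · simp
  | cons x xs' ih =>
    intro j acc hx h0 hj hpr
    rw [List.pairwise_cons] at hx
    obtain ⟨hxall, hx'⟩ := hx
    have hvle : vs.Pairwise (· ≤ ·) := hv.imp le_of_lt
    have hDpw : (vs.drop j.toNat).Pairwise (· < ·) := hv.sublist (List.drop_sublist _ _)
    have hDle : (vs.drop j.toNat).Pairwise (· ≤ ·) := hDpw.imp le_of_lt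
    obtain ⟨htw, hdw⟩ := tw_filter (fun v => decide (v < x)) (· ≤ ·)
      (by intro a b hab hb; simp at hb ⊢; omega) (vs.drop j.toNat) hDle
    set D := vs.drop j.toNat with hDdef
    set TW := D.filter (fun v => decide (v < x)) with hTWdef
    set DW := D.dropWhile (fun v => decide (v < x)) with hDWdef
    set n := D.countP (fun v => decide (v < x)) with hndef
    have hTDW : TW ++ DW = D := by rw [← htw]; exact List.takeWhile_append_dropWhile
    have hTWlen : TW.length = n := by rw [hTWdef, hndef, List.countP_eq_length_filter]
    have hTWlt : ∀ z ∈ TW, z < x := by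
      intro z hz; rw [hTWdef, List.mem_filter] at hz; simpa using hz.2
    have hDWge : ∀ z ∈ DW, x ≤ z := by
      intro z hz; rw [hdw, List.mem_filter] at hz; simpa using hz.2
    have hcount : vs.countP (fun v => decide (v < x)) = j.toNat + n := by
      conv_lhs => rw [← List.take_append_drop j.toNat vs]
      rw [List.countP_append]
      have h1 : (vs.take j.toNat).countP (fun v => decide (v < x)) = j.toNat := by
        rw [List.countP_eq_length.mpr (by
          intro a ha; exact decide_eq_true (hpr a ha x (by simp)))]
        rw [List.length_take]
        omega
      rw [h1]
    have hi : pvBinSearch vs x = ((j.toNat + n : Nat) : Int) := by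
      rw [binSearch_eq vs x hvle, hcount]
    have hlenD : D.length = vs.length - j.toNat := by rw [hDdef, List.length_drop]
    have hnD : n ≤ D.length := by rw [← hTWlen, ← hTDW]; simp
    have hslice : PySem.List.slice vs (some j) (some (pvBinSearch vs x)) = TW := by
      rw [hi, PySem.List.slice_toNat vs h0 (by positivity)]
      have h2 : ((j.toNat + n : Nat) : Int).toNat - j.toNat = n := by omega
      rw [h2, ← hDdef, ← hTDW, ← hTWlen, List.take_left]
    have hget : PySem.List.pyGet? vs (pvBinSearch vs x) = DW.head? := by
      rw [hi, PySem.List.pyGet?_natCast]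
      have h3 : vs[(j.toNat + n : Nat)]? = D[n]? := by
        rw [hDdef, List.getElem?_drop]
      rw [h3, ← hTDW, ← hTWlen]
      rw [List.getElem?_append_right (le_refl _)]
      simp [← List.head?_eq_getElem?]
    have hjt : j.toNat ≤ vs.length := by omega
    have hDlen2 : j.toNat + D.length = vs.length := by
      rw [hDdef, List.length_drop]; omega
    by_cases hcase : DW.head? = some x
    · obtain ⟨dtl, hDWeq⟩ : ∃ tl, DW = x :: tl := by
        cases hDW2 : DW with
        | nil => rw [hDW2] at hcase; simp at hcase
        | cons d0 tl =>
          rw [hDW2] at hcase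
          simp at hcase
          exact ⟨tl, by rw [hcase]⟩
      have hlen1 : n + 1 ≤ D.length := by
        rw [← hTDW, hDWeq, List.length_append, List.length_cons, hTWlen]; omega
      have hdtlgt : ∀ z ∈ dtl, x < z := by
        have hDWpw : DW.Pairwise (· < ·) := hDpw.sublist (List.dropWhile_sublist _)
        rw [hDWeq, List.pairwise_cons] at hDWpw
        exact hDWpw.1
      have hstep : pvSymStep vs (acc, j) x = (acc ++ TW, pvBinSearch vs x + 1) := by
        simp only [pvSymStep]
        rw [hget, hslice, hcase]
        simp
      have hdrop1 : vs.drop (pvBinSearch vs x + 1).toNat = dtl := by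
        have htoNat : (pvBinSearch vs x + 1).toNat = j.toNat + (n + 1) := by rw [hi]; omega
        rw [htoNat, ← List.drop_drop, ← hDdef, ← hTDW, hDWeq, ← hTWlen,
          List.drop_length_add_append 1]
        simp
      obtain ⟨Z', hZ'eq, hZ'pw, hZ'mem⟩ := ih (pvBinSearch vs x + 1) (acc ++ TW) hx'
        (by rw [hi]; omega)
        (by rw [hi]; push_cast; omega)
        (by intro v hvmem x' hx'mem
            have htoNat : (pvBinSearch vs x + 1).toNat = j.toNat + (n + 1) := by rw [hi]; omega
            rw [htoNat, List.take_add] at hvmem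
            have htk : (vs.drop j.toNat).take (n + 1) = TW ++ [x] := by
              rw [← hDdef, ← hTDW, hDWeq, ← hTWlen, List.take_length_add_append 1]
              simp
            rw [htk] at hvmem
            rcases List.mem_append.mp hvmem with hv' | hv'
            · exact lt_trans (hpr v hv' x (by simp)) (hxall x' hx'mem)
            · rcases List.mem_append.mp hv' with hv'' | hv''
              · exact lt_trans (hTWlt v hv'') (hxall x' hx'mem)
              · have : v = x := by simpa using hv''
                subst this
                exact hxall x' hx'mem)
      refine ⟨TW ++ Z', ?_, ?_, ?_⟩
      · rw [List.foldl_cons, hstep, hZ'eq]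
        simp [List.append_assoc]
      · rw [List.pairwise_append]
        refine ⟨hDpw.filter _, hZ'pw, ?_⟩
        intro a ha b hb
        have hax : a < x := hTWlt a ha
        have hbx : x < b := by
          rcases (hZ'mem b).mp hb with ⟨h1, _⟩ | ⟨_, h1⟩
          · rw [hdrop1] at h1; exact hdtlgt b h1
          · exact hxall b h1
        omega
      · intro z
        rw [List.mem_append, hZ'mem z, hdrop1]
        have hD1 : D = TW ++ x :: dtl := by rw [← hTDW, hDWeq]
        constructor
        · rintro (hz | ⟨h1, h2⟩ | ⟨h1, h2⟩)
          · refine Or.inl ⟨by rw [hD1]; exact List.mem_append.mpr (Or.inl hz), ?_⟩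
            intro hc
            have hzx := hTWlt z hz
            rcases List.mem_cons.mp hc with rfl | hc'
            · omega
            · exact absurd (hxall z hc') (by omega)
          · refine Or.inl ⟨(by rw [hD1]; exact List.mem_append.mpr (Or.inr (List.mem_cons_of_mem _ h1))), ?_⟩
            intro hc
            have hzx := hdtlgt z h1
            rcases List.mem_cons.mp hc with rfl | hc'
            · omega
            · exact h2 hc'
          · refine Or.inr ⟨?_, List.mem_cons_of_mem _ h2⟩
            intro hc
            have hzx := hxall z h2
            rw [hD1] at hc
            rcases List.mem_append.mp hc with hc' | hc'
            · exact absurd (hTWlt z hc') (by omega)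
            · rcases List.mem_cons.mp hc' with rfl | hc''
              · omega
              · exact h1 hc''
        · rintro (⟨hzD, hznot⟩ | ⟨hznD, hzin⟩)
          · rw [hD1] at hzD
            rcases List.mem_append.mp hzD with hz' | hz'
            · exact Or.inl hz'
            · rcases List.mem_cons.mp hz' with rfl | hz''
              · exact absurd (List.mem_cons_self) hznot
              · exact Or.inr (Or.inl ⟨hz'', fun hc => hznot (List.mem_cons_of_mem _ hc)⟩)
          · rcases List.mem_cons.mp hzin with hzx | hz'
            · subst hzx
              exact absurd (show z ∈ D by rw [hD1]; exact List.mem_append.mpr (Or.inr (List.mem_cons_self))) hznD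
            · refine Or.inr (Or.inr ⟨?_, hz'⟩)
              intro hc
              exact hznD (show z ∈ D by rw [hD1]; exact List.mem_append.mpr (Or.inr (List.mem_cons_of_mem _ hc)))
    · have hbeq : (DW.head? == some x) = false := by
        cases h : DW.head? with
        | none => rfl
        | some d0 =>
          have : d0 ≠ x := fun hh => hcase (by rw [h, hh])
          simp [this]
      have hDWgt : ∀ z ∈ DW, x < z := by
        intro z hz
        cases hDW2 : DW with
        | nil => rw [hDW2] at hz; simp at hz
        | cons d0 tl =>
          have hDWpw : DW.Pairwise (· < ·) := hDpw.sublist (List.dropWhile_sublist _)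
          have hd0x : x < d0 := by
            have h1 := hDWge d0 (by rw [hDW2]; simp)
            have hne : d0 ≠ x := fun hh => hcase (by rw [hDW2, hh]; rfl)
            omega
          rw [hDW2] at hz
          rcases List.mem_cons.mp hz with rfl | hz'
          · exact hd0x
          · rw [hDW2, List.pairwise_cons] at hDWpw
            have := hDWpw.1 z hz'
            omega
      have hstep : pvSymStep vs (acc, j) x = (acc ++ TW ++ [x], pvBinSearch vs x) := by
        simp only [pvSymStep]
        rw [hget, hslice, hbeq]
        simp
      have hdrop2 : vs.drop (pvBinSearch vs x).toNat = DW := by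
        have htoNat : (pvBinSearch vs x).toNat = j.toNat + n := by rw [hi]; omega
        rw [htoNat, ← List.drop_drop, ← hDdef, ← hTDW, ← hTWlen, List.drop_left]
      obtain ⟨Z', hZ'eq, hZ'pw, hZ'mem⟩ := ih (pvBinSearch vs x) (acc ++ TW ++ [x]) hx'
        (by rw [hi]; omega)
        (by rw [hi]; push_cast; omega)
        (by intro v hvmem x' hx'mem
            have htoNat : (pvBinSearch vs x).toNat = j.toNat + n := by rw [hi]; omega
            rw [htoNat, List.take_add] at hvmem
            have htk : (vs.drop j.toNat).take n = TW := by
              rw [← hDdef, ← hTDW, ← hTWlen, List.take_left]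
            rw [htk] at hvmem
            rcases List.mem_append.mp hvmem with hv' | hv'
            · exact lt_trans (hpr v hv' x (by simp)) (hxall x' hx'mem)
            · exact lt_trans (hTWlt v hv') (hxall x' hx'mem))
      have hD2 : D = TW ++ DW := hTDW.symm
      have hxnotD : x ∉ D := by
        intro hc
        rw [hD2] at hc
        rcases List.mem_append.mp hc with hc' | hc'
        · exact absurd (hTWlt x hc') (by omega)
        · exact absurd (hDWgt x hc') (by omega)
      refine ⟨TW ++ x :: Z', ?_, ?_, ?_⟩
      · rw [List.foldl_cons, hstep, hZ'eq]
        simp [List.append_assoc]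
      · rw [List.pairwise_append]
        refine ⟨hDpw.filter _, ?_, ?_⟩
        · rw [List.pairwise_cons]
          refine ⟨?_, hZ'pw⟩
          intro b hb
          rcases (hZ'mem b).mp hb with ⟨h1, _⟩ | ⟨_, h1⟩
          · rw [hdrop2] at h1; exact hDWgt b h1
          · exact hxall b h1
        · intro a ha b hb
          have hax := hTWlt a ha
          rcases List.mem_cons.mp hb with rfl | hb'
          · exact hax
          · rcases (hZ'mem b).mp hb' with ⟨h1, _⟩ | ⟨_, h1⟩
            · rw [hdrop2] at h1; have := hDWgt b h1; omega
            · have := hxall b h1; omega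
      · intro z
        rw [List.mem_append, List.mem_cons, hZ'mem z, hdrop2]
        constructor
        · rintro (hz | rfl | ⟨h1, h2⟩ | ⟨h1, h2⟩)
          · refine Or.inl ⟨by rw [hD2]; exact List.mem_append.mpr (Or.inl hz), ?_⟩
            intro hc
            have hzx := hTWlt z hz
            rcases List.mem_cons.mp hc with rfl | hc'
            · omega
            · exact absurd (hxall z hc') (by omega)
          · exact Or.inr ⟨hxnotD, List.mem_cons_self⟩
          · refine Or.inl ⟨by rw [hD2]; exact List.mem_append.mpr (Or.inr h1), ?_⟩
            intro hc
            have hzx := hDWgt z h1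
            rcases List.mem_cons.mp hc with rfl | hc'
            · omega
            · exact h2 hc'
          · refine Or.inr ⟨?_, List.mem_cons_of_mem _ h2⟩
            intro hc
            have hzx := hxall z h2
            rw [hD2] at hc
            rcases List.mem_append.mp hc with hc' | hc'
            · exact absurd (hTWlt z hc') (by omega)
            · exact h1 hc'
        · rintro (⟨hzD, hznot⟩ | ⟨hznD, hzin⟩)
          · rw [hD2] at hzD
            rcases List.mem_append.mp hzD with hz' | hz'
            · exact Or.inl hz'
            · exact Or.inr (Or.inr (Or.inl ⟨hz', fun hc => hznot (List.mem_cons_of_mem _ hc)⟩))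
          · rcases List.mem_cons.mp hzin with rfl | hz'
            · exact Or.inr (Or.inl rfl)
            · refine Or.inr (Or.inr (Or.inr ⟨?_, hz'⟩))
              intro hc
              exact hznD (by rw [hD2]; exact List.mem_append.mpr (Or.inr hc))

theorem symA_spec (vs xs1 : List Int) (hv : vs.Pairwise (· < ·)) (hx : xs1.Pairwise (· < ·)) :
    (pvSymA vs xs1).Pairwise (· < ·) ∧
    ∀ z, (z ∈ pvSymA vs xs1 ↔ ((z ∈ vs ∧ z ∉ xs1) ∨ (z ∉ vs ∧ z ∈ xs1))) := by
  obtain ⟨Z, heq, hpw, hmem⟩ := symRun vs hv xs1 0 [] hx (le_refl 0) (by positivity) (by simp)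
  have hA : pvSymA vs xs1 = [] ++ Z := heq
  rw [List.nil_append] at hA
  rw [hA]
  refine ⟨hpw, fun z => ?_⟩
  rw [hmem z]
  simp

theorem rowPar_eq_filter (E : List (Int × Int)) (y : Int) :
    pvRowParB E y = (E.filter (fun ev => decide (ev.1 ≤ y))).foldl
      (fun par ev => par.insert ev.2 (!(par.getD ev.2 false))) PySem.Dict.empty := by
  unfold pvRowParB
  rw [PySem.List.foldl_ite_eq_foldl_filter]

theorem rowPar_getD (E : List (Int × Int)) (y x : Int) :
    (pvRowParB E y).getD x false = actB E y x := by
  rw [rowPar_eq_filter, toggle_getD]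
  simp only [PySem.Dict.getD_empty, Bool.false_xor]
  unfold actB
  rw [List.countP_filter]

theorem rowPar_keys_nodup (E : List (Int × Int)) (y : Int) :
    (pvRowParB E y).keys.Nodup := by
  rw [rowPar_eq_filter]
  apply PySem.Dict.nodup_keys_foldl_insert_key
    (key := fun ev : Int × Int => ev.2)
    (f := fun par (ev : Int × Int) => !(par.getD ev.2 false))
  simp

theorem rowPar_mem_keys (E : List (Int × Int)) (y x : Int) :
    x ∈ (pvRowParB E y).keys ↔ x ∈ (E.filter (fun ev => decide (ev.1 ≤ y))).map (·.2) := by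
  rw [rowPar_eq_filter, PySem.Dict.keys_foldl_insert_key]
  rw [PySem.Dict.keys_empty, PySem.Set.update_nil_left]
  simp [PySem.Set.mem_ofList]

theorem innerB_fold (items : List (Int × Bool)) (t1 t0 : Int) :
    ∀ cross : Int,
    items.foldl (fun (cross : Int) xb =>
        if xb.2 then
          (let c1 := if xb.1 < t1 then cross + 1 else cross
           if xb.1 < t0 then c1 - 1 else c1)
        else cross) cross
      = cross + ((items.countP (fun xb => xb.2 && decide (xb.1 < t1)) : Nat) : Int)
          - ((items.countP (fun xb => xb.2 && decide (xb.1 < t0)) : Nat) : Int) := by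
  induction items with
  | nil => intro cross; simp
  | cons xb t ih =>
    intro cross
    simp only [List.foldl_cons, List.countP_cons]
    rw [ih]
    by_cases h2 : xb.2 <;> by_cases ha : xb.1 < t1 <;> by_cases hb : xb.1 < t0 <;>
      simp [h2, ha, hb] <;> push_cast <;> ring

theorem count_active (E : List (Int × Int)) (y : Int) (vs : List Int) (t1 : Int)
    (hnd : vs.Pairwise (· < ·)) (hmem : ∀ z, z ∈ vs ↔ actB E y z = true) :
    vs.countP (fun v => decide (v < t1)) =
      (pvRowParB E y).items.countP (fun xb => xb.2 && decide (xb.1 < t1)) := by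
  rw [PySem.Dict.items_eq_map_keys _ (rowPar_keys_nodup E y) false]
  rw [List.countP_map]
  have hcomp : ((fun xb : Int × Bool => xb.2 && decide (xb.1 < t1)) ∘
      (fun k => (k, (pvRowParB E y).getD k false))) =
      (fun k => decide (k < t1) && (pvRowParB E y).getD k false) := by
    funext k
    simp [Function.comp, Bool.and_comm]
  rw [hcomp, ← List.countP_filter]
  have hperm : vs.Perm ((pvRowParB E y).keys.filter (fun k => (pvRowParB E y).getD k false)) := by
    rw [List.perm_ext_iff_of_nodup (hnd.imp ne_of_lt)
      ((rowPar_keys_nodup E y).filter _)]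
    intro z
    rw [hmem z, List.mem_filter, rowPar_getD]
    constructor
    · intro hz
      refine ⟨?_, hz⟩
      rw [rowPar_mem_keys]
      have hpos : 0 < E.countP (fun ev => ev.2 == z && decide (ev.1 ≤ y)) := by
        rcases Nat.eq_zero_or_pos (E.countP (fun ev => ev.2 == z && decide (ev.1 ≤ y))) with h0 | h0
        · unfold actB at hz
          rw [h0] at hz
          simp at hz
        · exact h0
      obtain ⟨ev, hev, hp⟩ := List.countP_pos_iff.mp hpos
      simp at hp
      exact List.mem_map.mpr ⟨ev, List.mem_filter.mpr ⟨hev, by simp [hp.2]⟩, hp.1⟩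
    · exact fun h => h.2
  exact hperm.countP_eq _

theorem rowEq (E : List (Int × Int)) (y : Int) (hs : List (Int × Int)) (vs : List Int)
    (cross : Int) (hnd : vs.Pairwise (· < ·)) (hmem : ∀ z, z ∈ vs ↔ actB E y z = true) :
    hs.foldl (fun c p => if p.2 - p.1 == 1 then c
        else c + (pvBinSearch vs p.2 - pvBinSearch vs (p.1 + 1))) cross
      = pvRowB E cross (y, hs) := by
  unfold pvRowB
  simp only
  apply PySem.List.foldl_congr_mem
  intro c p _
  by_cases hdeg : p.2 - p.1 == 1
  · simp [hdeg]
  · simp only [hdeg, Bool.false_eq_true, if_false]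
    rw [binSearch_eq vs p.2 (hnd.imp le_of_lt), binSearch_eq vs (p.1 + 1) (hnd.imp le_of_lt)]
    rw [innerB_fold]
    rw [count_active E y vs p.2 hnd hmem, count_active E y vs (p.1 + 1) hnd hmem]
    ring

theorem act_split (E : List (Int × Int)) (t y x : Int) (hty : t ≤ y) :
    E.countP (fun ev => ev.2 == x && decide (ev.1 ≤ y)) =
      E.countP (fun ev => ev.2 == x && decide (ev.1 ≤ t)) +
      E.countP (fun ev => ev.2 == x && (decide (t < ev.1) && decide (ev.1 ≤ y))) := by
  rw [countP_and_split E (fun ev => ev.2 == x && decide (ev.1 ≤ y))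
    (fun ev => decide (ev.1 ≤ t))]
  congr 1
  · apply List.countP_congr
    intro a _
    by_cases h1 : a.2 = x <;> by_cases h2 : a.1 ≤ t <;> by_cases h3 : a.1 ≤ y <;>
      simp [h1, h2, h3] <;> omega
  · apply List.countP_congr
    intro a _
    by_cases h1 : a.2 = x <;> by_cases h2 : a.1 ≤ t <;> by_cases h3 : a.1 ≤ y <;>
      simp [h1, h2, h3] <;> omega

theorem foldl_min_le (l : List Int) : ∀ a : Int, l.foldl min a ≤ a ∧ ∀ z ∈ l, l.foldl min a ≤ z := by
  induction l with
  | nil => intro a; exact ⟨le_refl a, by simp⟩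
  | cons b t ih =>
    intro a
    simp only [List.foldl_cons]
    obtain ⟨h1, h2⟩ := ih (min a b)
    refine ⟨le_trans h1 (min_le_left _ _), ?_⟩
    intro z hz
    rcases List.mem_cons.mp hz with rfl | hz'
    · exact le_trans h1 (min_le_right _ _)
    · exact h2 z hz'

theorem matchLoop_inv (E : List (Int × Int)) :
    ∀ (rows : List (Int × List (Int × Int))) (r : List (Int × Int)) (vs : List Int)
      (cross t : Int),
    rows.Pairwise (fun a b => a.1 < b.1) →
    (∀ row ∈ rows, t ≤ row.1) →
    r.Pairwise (fun a b => a.1 ≤ b.1) →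
    r.Perm (E.filter (fun ev => decide (t < ev.1))) →
    vs.Pairwise (· < ·) →
    (∀ z, z ∈ vs ↔ actB E t z = true) →
    (rows.foldl pvMatchStepA (r.reverse, vs, cross)).2.2 = rows.foldl (pvRowB E) cross := by
  intro rows
  induction rows with
  | nil => intros; rfl
  | cons row rows' ih =>
    intro r vs cross t hrpw hrt hsorted hperm hvpw hvmem
    obtain ⟨y, hs⟩ := row
    rw [List.pairwise_cons] at hrpw
    obtain ⟨hyall, hrpw'⟩ := hrpw
    have hty : t ≤ y := hrt (y, hs) (by simp)
    obtain ⟨htw, hdw⟩ := tw_filter (fun p : Int × Int => decide (p.1 ≤ y))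
      (fun a b => a.1 ≤ b.1) (by intro a b hab hb; simp at hb ⊢; omega) r hsorted
    have hpr : pvPopLoop y r.reverse [] =
        ((r.dropWhile (fun p => decide (p.1 ≤ y))).reverse,
         (r.takeWhile (fun p => decide (p.1 ≤ y))).map (·.2)) := by
      rw [popLoop_eq]
      simp
    have hWperm : (r.filter (fun p => decide (p.1 ≤ y))).Perm
        (E.filter (fun ev => decide (t < ev.1) && decide (ev.1 ≤ y))) := by
      have h1 := hperm.filter (fun p : Int × Int => decide (p.1 ≤ y))
      rw [List.filter_filter] at h1
      exact h1.trans (List.Perm.of_eq (List.filter_congr (by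
        intro a _; by_cases h2 : t < a.1 <;> by_cases h3 : a.1 ≤ y <;> simp [h2, h3])))
    have hr'pw : (r.dropWhile (fun p => decide (p.1 ≤ y))).Pairwise (fun a b => a.1 ≤ b.1) := by
      rw [hdw]; exact hsorted.filter _
    have hr'perm : (r.dropWhile (fun p => decide (p.1 ≤ y))).Perm
        (E.filter (fun ev => decide (y < ev.1))) := by
      rw [hdw]
      have h1 := hperm.filter (fun p : Int × Int => !decide (p.1 ≤ y))
      rw [List.filter_filter] at h1
      exact h1.trans (List.Perm.of_eq (List.filter_congr (by
        intro a _; by_cases h2 : t < a.1 <;> by_cases h3 : a.1 ≤ y <;>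
          simp [h2, h3] <;> omega)))
    have hwin : ∀ x, ((r.takeWhile (fun p => decide (p.1 ≤ y))).map (·.2)).count x =
        E.countP (fun ev => ev.2 == x && (decide (t < ev.1) && decide (ev.1 ≤ y))) := by
      intro x
      rw [htw, List.count_eq_countP, List.countP_map]
      rw [hWperm.countP_eq, List.countP_filter]
      apply List.countP_congr
      intro a _
      simp [Function.comp, Bool.and_comm]
    simp only [List.foldl_cons, pvMatchStepA, hpr]
    by_cases hxs : (r.takeWhile (fun p => decide (p.1 ≤ y))).map (·.2) = []
    · have hwin0 : ∀ x, E.countP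
          (fun ev => ev.2 == x && (decide (t < ev.1) && decide (ev.1 ≤ y))) = 0 := by
        intro x
        rw [← hwin x, hxs]
        rfl
      have hact : ∀ x, actB E y x = actB E t x := by
        intro x
        unfold actB
        rw [act_split E t y x hty, hwin0 x]
        simp
      rw [hxs]
      simp only [ne_eq, not_true_eq_false, if_false]
      rw [rowEq E y hs vs cross hvpw (fun z => by rw [hvmem z, ← hact z])]
      exact ih (r.dropWhile (fun p => decide (p.1 ≤ y))) vs (pvRowB E cross (y, hs)) y
        hrpw' (fun row' h => le_of_lt (hyall row' h)) hr'pw hr'perm hvpw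
        (fun z => by rw [hvmem z, ← hact z])
    · obtain ⟨hopw, homem⟩ := oddA_spec _ hxs
      obtain ⟨hspw, hsmem⟩ := symA_spec vs _ hvpw hopw
      have hvmem' : ∀ z, z ∈ pvSymA vs (pvOddA ((r.takeWhile (fun p => decide (p.1 ≤ y))).map (·.2))) ↔
          actB E y z = true := by
        intro z
        rw [hsmem z, hvmem z, homem z, hwin z]
        unfold actB
        rw [act_split E t y z hty]
        rcases Nat.even_or_odd (E.countP (fun ev => ev.2 == z && decide (ev.1 ≤ t))) with h1 | h1 <;>
          rcases Nat.even_or_odd (E.countP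
            (fun ev => ev.2 == z && (decide (t < ev.1) && decide (ev.1 ≤ y)))) with h2 | h2 <;>
          simp [Nat.even_iff, Nat.odd_iff] at h1 h2 <;>
          simp [h1, h2, Nat.add_mod]
      rw [if_pos hxs]
      rw [rowEq E y hs _ cross hspw hvmem']
      exact ih (r.dropWhile (fun p => decide (p.1 ≤ y))) _ (pvRowB E cross (y, hs)) y
        hrpw' (fun row' h => le_of_lt (hyall row' h)) hr'pw hr'perm hspw hvmem'

theorem match_eq (horz vert : List (Int × List (Int × Int)))
    (hp : horz.Pairwise (fun a b => a.1 < b.1)) :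
    pvMatchA horz vert =
      horz.foldl (pvRowB (vert.flatMap (fun xv =>
        (xv.2.filter (fun p => decide (p.2 - p.1 > 1))).flatMap
          (fun p => [(p.1 + 1, xv.1), (p.2, xv.1)])))) 0 := by
  unfold pvMatchA
  set E := vert.flatMap (fun xv =>
    (xv.2.filter (fun p => decide (p.2 - p.1 > 1))).flatMap
      (fun p => [(p.1 + 1, xv.1), (p.2, xv.1)])) with hE
  set t0 := ((E.map (·.1) ++ horz.map (·.1)).foldl min 0) - 1 with ht0
  obtain ⟨hminle, hminall⟩ := foldl_min_le (E.map (·.1) ++ horz.map (·.1)) 0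
  have hrt : ∀ row ∈ horz, t0 ≤ row.1 := by
    intro row hrow
    have := hminall row.1 (List.mem_append.mpr (Or.inr (List.mem_map.mpr ⟨row, hrow, rfl⟩)))
    omega
  have hEgt : ∀ ev ∈ E, t0 < ev.1 := by
    intro ev hev
    have := hminall ev.1 (List.mem_append.mpr (Or.inl (List.mem_map.mpr ⟨ev, hev, rfl⟩)))
    omega
  have hpair : (PySem.List.sorted E (fun p => -p.1)).reverse.Pairwise
      (fun a b => a.1 ≤ b.1) := by
    rw [List.pairwise_reverse]
    have h1 := PySem.List.sorted_pairwise (xs := E) (key := fun p : Int × Int => -p.1)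
    exact h1.imp (by intro a b h; omega)
  have hperm : (PySem.List.sorted E (fun p => -p.1)).reverse.Perm
      (E.filter (fun ev => decide (t0 < ev.1))) := by
    rw [List.filter_eq_self.mpr (by intro ev hev; simpa using hEgt ev hev)]
    exact (List.reverse_perm _).trans (PySem.List.sorted_perm _ _ _)
  have hvmem : ∀ z : Int, z ∈ ([] : List Int) ↔ actB E t0 z = true := by
    intro z
    simp only [List.not_mem_nil, false_iff]
    unfold actB
    rw [List.countP_eq_zero.mpr (by
      intro ev hev
      have := hEgt ev hev
      simp only [Bool.and_eq_true, beq_iff_eq, decide_eq_true_eq, not_and]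
      intro _
      omega)]
    simp
  have hfinal := matchLoop_inv E horz (PySem.List.sorted E (fun p => -p.1)).reverse
    [] 0 t0 hp hrt hpair hperm List.Pairwise.nil hvmem
  rw [List.reverse_reverse] at hfinal
  exact hfinal

-- ===== VERDICT (by name: the statement is the Claim_ definition above) =====
theorem getPlusSignCount_spec : Claim_equal_getPlusSignCount := by
  intro N L D _
  unfold Spec_getPlusSignCount getPlusSignCount getPlusSignCount_alt
  have hb := build_rel (L.zip D.toList) [] [] 0 0
  simp only [show segDict [] = PySem.Dict.empty from rfl] at hb
  rw [hb]
  simp only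
  rw [organize_eq, organize_eq]
  apply match_eq
  rw [arrangeB_shape]
  have hkeys := PySem.List.sorted_ofList_pairwise_lt
    (xs := ((L.zip D.toList).foldl pvStepB ([], [], 0, 0)).1.map (·.1))
  exact List.Pairwise.map _ (by intro a b h; simpa using h) hkeys
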